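-- pv_equiv track=rewrite | github.com/PrabhatKushwaha5/DSA_Using-_Python | 1Companies/flipcart/Easy/PerfectPeakElement.py | perfectPeak
-- ===== SOURCE A (Python) =====
-- def perfectPeak(A):
--     N = len(A)
--     if N < 3:
--         return 0
--     left_max = [0] * N
--     left_max[0] = A[0]
--     for i in range(1, N):
--         left_max[i] = max(left_max[i-1], A[i])
--     right_min = [0] * N
--     right_min[N-1] = A[N-1]
--     for i in range(N-2, -1, -1):
--         right_min[i] = min(right_min[i+1], A[i])
--     for i in range(1, N-1):
--         if A[i] > left_max[i-1] and A[i] < right_min[i+1]: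
--             return 1
--     return 0
-- ===== SOURCE B (Python) =====
-- def perfectPeak(A):
--     N = len(A)
--     if N < 3:
--         return 0
--     for i in range(1, N - 1):
--         if all(A[j] < A[i] for j in range(i)) and all(A[j] > A[i] for j in range(i + 1, N)):
--             return 1
--     return 0
-- ===== Notes on version B (the rewrite author's own statement) =====
-- stated objective: simpler
-- what changed: Drops the prefix-max and suffix-min auxiliary arrays: for each candidate index it directly scans the elements to its left and right with all(...), so no tables are built or indexed.
import Mathlib
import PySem

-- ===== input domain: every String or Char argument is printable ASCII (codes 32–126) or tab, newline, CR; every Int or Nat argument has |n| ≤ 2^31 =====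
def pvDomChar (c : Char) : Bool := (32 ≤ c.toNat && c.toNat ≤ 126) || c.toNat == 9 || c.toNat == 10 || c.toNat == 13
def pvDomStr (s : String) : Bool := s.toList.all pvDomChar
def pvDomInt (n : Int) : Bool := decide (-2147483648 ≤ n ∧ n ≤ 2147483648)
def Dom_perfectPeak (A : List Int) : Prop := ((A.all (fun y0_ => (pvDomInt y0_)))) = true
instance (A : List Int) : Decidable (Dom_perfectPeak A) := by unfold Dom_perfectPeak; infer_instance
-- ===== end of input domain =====

-- B drops A's prefix-max/suffix-min tables and instead rescans left and right of each candidate (simpler, no auxiliary arrays); return values proved equal on all inputs.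

-- ===== PORT A =====
-- final loop of A: scan indices, return 1 at the first hit, else 0
def pvAScan (A lm rm : List Int) : List Int → Int
  | [] => 0
  | i :: rest =>
      if PySem.List.pyGetD A i 0 > PySem.List.pyGetD lm (i - 1) 0 ∧
         PySem.List.pyGetD A i 0 < PySem.List.pyGetD rm (i + 1) 0 then 1
      else pvAScan A lm rm rest

def perfectPeak (A : List Int) : Int :=
  let N : Int := A.length
  if N < 3 then 0
  else
    let left_max :=
      (PySem.List.pyRange 1 N 1).foldl
        (fun lm i => PySem.List.pySetD lm i
          (max (PySem.List.pyGetD lm (i - 1) 0) (PySem.List.pyGetD A i 0)))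
        (PySem.List.pySetD (List.replicate N.toNat 0) 0 (PySem.List.pyGetD A 0 0))
    let right_min :=
      (PySem.List.pyRange (N - 2) (-1) (-1)).foldl
        (fun rm i => PySem.List.pySetD rm i
          (min (PySem.List.pyGetD rm (i + 1) 0) (PySem.List.pyGetD A i 0)))
        (PySem.List.pySetD (List.replicate N.toNat 0) (N - 1) (PySem.List.pyGetD A (N - 1) 0))
    pvAScan A left_max right_min (PySem.List.pyRange 1 (N - 1) 1)

-- ===== PORT B =====
-- B's loop: for each i, scan everything left of i and everything right of i
def pvBScan (A : List Int) (N : Int) : List Int → Int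
  | [] => 0
  | i :: rest =>
      if ((PySem.List.pyRange 0 i 1).all
            (fun j => decide (PySem.List.pyGetD A j 0 < PySem.List.pyGetD A i 0)) &&
          (PySem.List.pyRange (i + 1) N 1).all
            (fun j => decide (PySem.List.pyGetD A j 0 > PySem.List.pyGetD A i 0))) then 1
      else pvBScan A N rest

def perfectPeak_alt (A : List Int) : Int :=
  let N : Int := A.length
  if N < 3 then 0
  else pvBScan A N (PySem.List.pyRange 1 (N - 1) 1)

-- ===== PRECONDITION & SPEC =====
def Spec_perfectPeak (A : List Int) (out : Int) : Prop := out = perfectPeak_alt A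
instance (A : List Int) (out : Int) : Decidable (Spec_perfectPeak A out) := by unfold Spec_perfectPeak; infer_instance

-- ===== CLAIM (what is proved, stated in full; the proofs are below) =====
def Claim_equal_perfectPeak : Prop := ∀ (A : List Int), Dom_perfectPeak A → Spec_perfectPeak A (perfectPeak A)

-- ===== LEMMAS AND PROOFS =====

-- running prefix max: pvPm A k = max(A[0], …, A[k])
def pvPm (A : List Int) : Nat → Int
  | 0 => PySem.List.pyGetD A 0 0
  | k + 1 => max (pvPm A k) (PySem.List.pyGetD A ((k : Int) + 1) 0)

-- running suffix min: pvSm A k = min(A[k], …, A[n-1])  (k < n)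
def pvSm (A : List Int) (k : Nat) : Int :=
  if h : k + 1 < A.length then
    min (pvSm A (k + 1)) (PySem.List.pyGetD A (k : Int) 0)
  else PySem.List.pyGetD A (k : Int) 0
termination_by A.length - k

theorem pvPm_gt_iff (A : List Int) (k : Nat) (x : Int) :
    (x > pvPm A k ↔ ∀ j : Nat, j ≤ k → x > PySem.List.pyGetD A (j : Int) 0) := by
  induction k with
  | zero =>
      constructor
      · intro h j hj
        have : j = 0 := Nat.le_zero.mp hj
        subst this; simpa [pvPm] using h
      · intro h; simpa [pvPm] using h 0 le_rfl
  | succ k ih =>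
      constructor
      · intro h j hj
        rcases Nat.lt_or_ge j (k + 1) with hlt | hge
        · exact (ih.mp (lt_of_le_of_lt (le_max_left _ _) h)) j (Nat.lt_succ_iff.mp hlt)
        · have : j = k + 1 := le_antisymm hj hge
          subst this
          have := lt_of_le_of_lt (le_max_right _ _) h
          simpa using this
      · intro h
        have h1 : x > pvPm A k := ih.mpr (fun j hj => h j (Nat.le_succ_of_le hj))
        have h2 := h (k + 1) le_rfl
        simp only [pvPm]
        push_cast at h2 ⊢
        omega

theorem pvSm_lt_iff (A : List Int) (k : Nat) (hkn : k < A.length) (x : Int) :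
    (x < pvSm A k ↔ ∀ j : Nat, k ≤ j → j < A.length → x < PySem.List.pyGetD A (j : Int) 0) := by
  induction hk : A.length - k using Nat.strong_induction_on generalizing k with
  | _ m ih =>
    rw [pvSm]
    split_ifs with h
    · have ihk := ih (A.length - (k + 1)) (by omega) (k + 1) h rfl
      constructor
      · intro hx j hkj hjn
        rcases Nat.lt_or_ge k j with hlt | hge
        · exact ihk.mp (lt_of_lt_of_le hx (min_le_left _ _)) j hlt hjn
        · have : j = k := le_antisymm hge hkj
          subst this
          exact lt_of_lt_of_le hx (min_le_right _ _)
      · intro hall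
        have h1 : x < pvSm A (k + 1) := ihk.mpr fun j hj hjn => hall j (by omega) hjn
        have h2 : x < PySem.List.pyGetD A (k : Int) 0 := hall k le_rfl (by omega)
        omega
    · constructor
      · intro hx j hkj hjn
        have : j = k := by omega
        subst this; exact hx
      · intro hall
        exact hall k le_rfl hkn

-- fold invariant for A's left_max loop
theorem pvLm_inv (A : List Int) (j : Int) (lm : List Int)
    (hj1 : 1 ≤ j) (hjN : j ≤ (A.length : Int)) (hlen : lm.length = A.length)
    (hinv : ∀ k : Nat, (k : Int) < j → PySem.List.pyGetD lm (k : Int) 0 = pvPm A k) :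
    ∀ k : Nat, (k : Int) < (A.length : Int) →
      PySem.List.pyGetD
        ((PySem.List.pyRange j (A.length : Int) 1).foldl
          (fun lm i => PySem.List.pySetD lm i
            (max (PySem.List.pyGetD lm (i - 1) 0) (PySem.List.pyGetD A i 0))) lm)
        (k : Int) 0 = pvPm A k := by
  induction hm : (((A.length : Int)) - j).toNat using Nat.strong_induction_on generalizing j lm with
  | _ m ih =>
    rcases lt_or_eq_of_le hjN with hlt | heq
    · rw [PySem.List.pyRange_one_cons hlt]
      simp only [List.foldl_cons]
      have hj0 : ((j.toNat : Nat) : Int) = j := Int.toNat_of_nonneg (by omega)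
      have hjlen : j.toNat < lm.length := by omega
      refine ih (((A.length : Int) - (j + 1)).toNat) (by omega) (j + 1)
        _ (by omega) (by omega) (by simp [PySem.List.length_pySetD, hlen]) ?_ (by omega)
      intro k hk
      rw [← hj0, PySem.List.pyGetD_pySetD_natCast _ _ _ _ _ hjlen]
      split_ifs with hkj
      · have hkeq : k = j.toNat := by exact_mod_cast hkj
        subst hkeq
        have hk1 : j.toNat = (j - 1).toNat + 1 := by omega
        have hc1 : (((j - 1).toNat : Nat) : Int) = j - 1 := by omega
        rw [hk1, pvPm]
        have hlm1 : PySem.List.pyGetD lm ((j - 1).toNat : Int) 0 = pvPm A (j - 1).toNat :=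
          hinv (j - 1).toNat (by omega)
        rw [hc1] at hlm1
        rw [← hlm1]
        congr 2
        omega
      · exact hinv k (by omega)
    · subst heq
      rw [PySem.List.pyRange_one_eq_nil le_rfl]
      intro k hk
      exact hinv k hk

-- fold invariant for A's right_min loop
theorem pvRm_inv (A : List Int) (j : Int) (rm : List Int)
    (hj1 : -1 ≤ j) (hjN : j ≤ (A.length : Int) - 2) (hlen : rm.length = A.length)
    (hinv : ∀ k : Nat, j < (k : Int) → (k : Int) ≤ (A.length : Int) - 1 →
       PySem.List.pyGetD rm (k : Int) 0 = pvSm A k) :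
    ∀ k : Nat, (k : Int) < (A.length : Int) →
      PySem.List.pyGetD
        ((PySem.List.pyRange j (-1) (-1)).foldl
          (fun rm i => PySem.List.pySetD rm i
            (min (PySem.List.pyGetD rm (i + 1) 0) (PySem.List.pyGetD A i 0))) rm)
        (k : Int) 0 = pvSm A k := by
  induction hm : (j + 1).toNat using Nat.strong_induction_on generalizing j rm with
  | _ m ih =>
    rcases lt_or_eq_of_le hj1 with hlt | heq
    · rw [PySem.List.pyRange_neg_one_cons hlt]
      simp only [List.foldl_cons]
      have hj0 : ((j.toNat : Nat) : Int) = j := Int.toNat_of_nonneg (by omega)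
      have hjlen : j.toNat < rm.length := by omega
      refine ih (j - 1 + 1).toNat (by omega) (j - 1)
        _ (by omega) (by omega) (by simp [PySem.List.length_pySetD, hlen]) ?_ rfl
      intro k hk1 hk2
      rw [← hj0, PySem.List.pyGetD_pySetD_natCast _ _ _ _ _ hjlen]
      split_ifs with hkj
      · have hkeq : k = j.toNat := by exact_mod_cast hkj
        subst hkeq
        have hsm : pvSm A j.toNat =
            min (pvSm A (j.toNat + 1)) (PySem.List.pyGetD A ((j.toNat : Nat) : Int) 0) := by
          rw [pvSm]
          rw [dif_pos (by omega)]
        rw [hsm, hj0]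
        have hrm1 : PySem.List.pyGetD rm ((j.toNat + 1 : Nat) : Int) 0 = pvSm A (j.toNat + 1) :=
          hinv (j.toNat + 1) (by omega) (by omega)
        have hc : ((j.toNat + 1 : Nat) : Int) = j + 1 := by omega
        rw [hc] at hrm1
        rw [← hrm1]
      · exact hinv k (by omega) hk2
    · rw [← heq]
      rw [PySem.List.pyRange_neg_one_eq_nil (by omega)]
      intro k hk
      exact hinv k (by omega) (by omega)

-- the two scans agree when their per-index conditions agree
theorem pvScan_congr (A lm rm : List Int) (N : Int) (l : List Int)
    (h : ∀ i ∈ l,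
      ((PySem.List.pyGetD A i 0 > PySem.List.pyGetD lm (i - 1) 0 ∧
        PySem.List.pyGetD A i 0 < PySem.List.pyGetD rm (i + 1) 0) ↔
       (((PySem.List.pyRange 0 i 1).all
            (fun j => decide (PySem.List.pyGetD A j 0 < PySem.List.pyGetD A i 0)) &&
          (PySem.List.pyRange (i + 1) N 1).all
            (fun j => decide (PySem.List.pyGetD A j 0 > PySem.List.pyGetD A i 0))) = true))) :
    pvAScan A lm rm l = pvBScan A N l := by
  induction l with
  | nil => rfl
  | cons i rest ih =>
      simp only [pvAScan, pvBScan]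
      rw [if_congr (h i (List.mem_cons_self)) rfl (ih (fun x hx => h x (List.mem_cons_of_mem _ hx)))]

-- ===== VERDICT (by name: the statement is the Claim_ definition above) =====
theorem perfectPeak_spec : Claim_equal_perfectPeak := by
  intro A _
  show perfectPeak A = perfectPeak_alt A
  unfold perfectPeak perfectPeak_alt
  by_cases h3 : (A.length : Int) < 3
  · simp only [if_pos h3]
  · simp only [if_neg h3]
    have hN : 3 ≤ (A.length : Int) := by omega
    apply pvScan_congr
    intro i hi
    rw [PySem.List.mem_pyRange_one] at hi
    obtain ⟨hi1, hi2⟩ := hi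
    -- characterize the left_max table
    have hlen0 : (PySem.List.pySetD (List.replicate (Int.toNat (A.length : Int)) (0:Int)) 0
        (PySem.List.pyGetD A 0 0)).length = A.length := by
      simp [PySem.List.length_pySetD]
    have hinv0 : ∀ k : Nat, (k : Int) < 1 →
        PySem.List.pyGetD (PySem.List.pySetD (List.replicate (Int.toNat (A.length : Int)) (0:Int)) 0
          (PySem.List.pyGetD A 0 0)) (k : Int) 0 = pvPm A k := by
      intro k hk
      have hk0 : k = 0 := by omega
      subst hk0
      have := PySem.List.pyGetD_pySetD_natCast
        (List.replicate (Int.toNat (A.length : Int)) (0:Int)) 0 0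
        (PySem.List.pyGetD A 0 0) 0 (by simp; omega)
      simpa [pvPm] using this
    have hlm := pvLm_inv A 1
      (PySem.List.pySetD (List.replicate (Int.toNat (A.length : Int)) (0:Int)) 0
        (PySem.List.pyGetD A 0 0)) (by omega) (by omega) hlen0 hinv0 (i - 1).toNat (by omega)
    have hci : (((i - 1).toNat : Nat) : Int) = i - 1 := by omega
    rw [hci] at hlm
    -- characterize the right_min table
    have hsetc : ((A.length : Int) - 1) = (((A.length - 1 : Nat) : Nat) : Int) := by omega
    have hlen1 : (PySem.List.pySetD (List.replicate (Int.toNat (A.length : Int)) (0:Int))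
        ((A.length : Int) - 1) (PySem.List.pyGetD A ((A.length : Int) - 1) 0)).length = A.length := by
      simp [PySem.List.length_pySetD]
    have hinv1 : ∀ k : Nat, (A.length : Int) - 2 < (k : Int) → (k : Int) ≤ (A.length : Int) - 1 →
        PySem.List.pyGetD (PySem.List.pySetD (List.replicate (Int.toNat (A.length : Int)) (0:Int))
          ((A.length : Int) - 1) (PySem.List.pyGetD A ((A.length : Int) - 1) 0)) (k : Int) 0 = pvSm A k := by
      intro k hk1 hk2
      have hkeq : k = A.length - 1 := by omega
      subst hkeq
      rw [hsetc]
      rw [PySem.List.pyGetD_pySetD_natCast _ _ _ _ _ (by simp; omega)]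
      rw [if_pos rfl]
      rw [pvSm, dif_neg (by omega)]
    have hrm := pvRm_inv A ((A.length : Int) - 2)
      (PySem.List.pySetD (List.replicate (Int.toNat (A.length : Int)) (0:Int))
        ((A.length : Int) - 1) (PySem.List.pyGetD A ((A.length : Int) - 1) 0))
      (by omega) (by omega) hlen1 hinv1 (i + 1).toNat (by omega)
    have hcj : (((i + 1).toNat : Nat) : Int) = i + 1 := by omega
    rw [hcj] at hrm
    rw [hlm, hrm]
    -- pointwise equivalence of the two conditions
    have hL : (PySem.List.pyGetD A i 0 > pvPm A (i - 1).toNat) ↔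
        (∀ j : Int, 0 ≤ j → j < i → PySem.List.pyGetD A j 0 < PySem.List.pyGetD A i 0) := by
      rw [pvPm_gt_iff]
      constructor
      · intro h j hj0 hji
        have hc : ((j.toNat : Nat) : Int) = j := Int.toNat_of_nonneg hj0
        have := h j.toNat (by omega)
        rwa [hc] at this
      · intro h j hj
        exact h (j : Int) (by omega) (by omega)
    have hR : (PySem.List.pyGetD A i 0 < pvSm A (i + 1).toNat) ↔
        (∀ j : Int, i + 1 ≤ j → j < (A.length : Int) →
          PySem.List.pyGetD A j 0 > PySem.List.pyGetD A i 0) := by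
      rw [pvSm_lt_iff A _ (by omega)]
      constructor
      · intro h j hj1 hj2
        have hc : ((j.toNat : Nat) : Int) = j := Int.toNat_of_nonneg (by omega)
        have := h j.toNat (by omega) (by omega)
        rwa [hc] at this
      · intro h j hj1 hj2
        exact h (j : Int) (by omega) (by omega)
    rw [hL, hR]
    simp only [Bool.and_eq_true, List.all_eq_true, PySem.List.mem_pyRange_one,
      decide_eq_true_eq, and_imp]
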